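-- pv_equiv track=rewrite | github.com/yellowcat-dotcom/metodPoiskOptimization | lr_8.py | get_outbriding_by_phenotype
-- ===== SOURCE A (Python) =====
-- def rosenbrock_function(x, y):
--     return (1 - x) ** 2 + 100 * (y - x ** 2) ** 2
--
-- def get_outbriding_by_phenotype(population):
--     parents_pairs = []
--     function_values = []
--
--     for i in range(len(population)):
--         function_values.append(rosenbrock_function(population[i][0], population[i][1]))
--
--     for i in range(len(population)):
--         mx = abs(function_values[i] - function_values[0])
--         second_parent = 0
--
--         for j in range(len(population)):
--             if j != i and abs(function_values[i] - function_values[j]) > mx: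
--                 second_parent = j
--                 mx = abs(function_values[i] - function_values[j])
--
--         parents_pairs.append([population[i], population[second_parent]])
--
--     return parents_pairs
-- ===== SOURCE B (Python) =====
-- def rosenbrock_function(x, y):
--     return (1 - x) ** 2 + 100 * (y - x ** 2) ** 2
--
-- def get_outbriding_by_phenotype(population):
--     if not population:
--         return []
--     f = [rosenbrock_function(p[0], p[1]) for p in population]
--     m = min(f)
--     M = max(f)
--     imin = f.index(m)
--     imax = f.index(M)
--     both = min(imin, imax)
--     def partner(fi):
--         d_low = fi - m
--         d_high = M - fi
--         if d_low > d_high: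
--             return imin
--         if d_high > d_low:
--             return imax
--         return both
--     return [[population[i], population[partner(f[i])]] for i in range(len(population))]
-- ===== Notes on version B (the rewrite author's own statement) =====
-- stated objective: faster
-- what changed: A scans all n candidate partners for each of the n individuals; B computes the fitness list once, takes the min/max fitness values with their first-occurrence indices, and picks each partner as the farther of the two extremes (smaller index on a tie), removing the inner scan.
import Mathlib
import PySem

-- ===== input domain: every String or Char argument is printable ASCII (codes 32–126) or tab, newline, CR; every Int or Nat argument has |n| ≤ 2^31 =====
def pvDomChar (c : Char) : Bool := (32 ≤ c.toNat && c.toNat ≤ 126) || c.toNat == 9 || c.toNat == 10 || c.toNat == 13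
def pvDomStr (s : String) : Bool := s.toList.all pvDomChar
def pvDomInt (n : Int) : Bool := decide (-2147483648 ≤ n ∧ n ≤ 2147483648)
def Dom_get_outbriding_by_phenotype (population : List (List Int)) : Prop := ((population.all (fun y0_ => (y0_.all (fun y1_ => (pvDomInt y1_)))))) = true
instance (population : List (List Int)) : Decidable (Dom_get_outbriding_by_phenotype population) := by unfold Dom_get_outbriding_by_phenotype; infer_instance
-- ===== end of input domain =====

-- B replaces A's quadratic all-pairs distance scan by one pass using the min/max fitness values
-- (the farthest fitness from any point is at an extreme), with first-occurrence index tie-breaks.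

-- ===== PORT A =====
def rosenbrock_function (x y : Int) : Int := (1 - x) ^ 2 + 100 * (y - x ^ 2) ^ 2

def get_outbriding_by_phenotype (population : List (List Int)) : List (List (List Int)) :=
  let function_values : List Int :=
    (PySem.List.pyRange 0 (population.length : Int) 1).foldl
      (fun acc i =>
        acc ++ [rosenbrock_function
          (PySem.List.pyGetD (PySem.List.pyGetD population i []) 0 0)
          (PySem.List.pyGetD (PySem.List.pyGetD population i []) 1 0)]) []
  (PySem.List.pyRange 0 (population.length : Int) 1).foldl
    (fun parents_pairs i =>
      let r :=
        (PySem.List.pyRange 0 (population.length : Int) 1).foldl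
          (fun (st : Int × Int) j =>
            if j ≠ i ∧ |PySem.List.pyGetD function_values i 0 - PySem.List.pyGetD function_values j 0| > st.2
            then (j, |PySem.List.pyGetD function_values i 0 - PySem.List.pyGetD function_values j 0|)
            else st)
          ((0 : Int), |PySem.List.pyGetD function_values i 0 - PySem.List.pyGetD function_values 0 0|)
      parents_pairs ++ [[PySem.List.pyGetD population i [], PySem.List.pyGetD population r.1 []]])
    []

-- ===== PORT B =====
def get_outbriding_by_phenotype_alt (population : List (List Int)) : List (List (List Int)) :=
  if population = [] then []
  else
    let f := population.map (fun p =>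
      rosenbrock_function (PySem.List.pyGetD p 0 0) (PySem.List.pyGetD p 1 0))
    let m := (PySem.List.min? f (fun x => x)).getD 0
    let M := (PySem.List.max? f (fun x => x)).getD 0
    let imin := (PySem.List.index? f m).getD 0
    let imax := (PySem.List.index? f M).getD 0
    let both := min imin imax
    (List.range population.length).map (fun i =>
      let fi := f.getD i 0
      let j := if fi - m > M - fi then imin
               else if M - fi > fi - m then imax
               else both
      [population.getD i [], population.getD j []])

-- ===== PRECONDITION & SPEC =====
-- Pre_ excludes exactly the inputs where Python A raises IndexError: a row with fewer than 2 coordinates.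
def Pre_get_outbriding_by_phenotype (population : List (List Int)) : Prop :=
  ∀ p ∈ population, 2 ≤ p.length
instance (population : List (List Int)) : Decidable (Pre_get_outbriding_by_phenotype population) := by
  unfold Pre_get_outbriding_by_phenotype; infer_instance
def pvWitness_get_outbriding_by_phenotype : List (List Int) := [[0, 0], [1, 2], [2, 1]]

def Spec_get_outbriding_by_phenotype (population : List (List Int)) (out : List (List (List Int))) : Prop := out = get_outbriding_by_phenotype_alt population
instance (population : List (List Int)) (out : List (List (List Int))) : Decidable (Spec_get_outbriding_by_phenotype population out) := by unfold Spec_get_outbriding_by_phenotype; infer_instance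

-- ===== CLAIM (what is proved, stated in full; the proofs are below) =====
def Claim_equal_get_outbriding_by_phenotype : Prop := ∀ (population : List (List Int)), Dom_get_outbriding_by_phenotype population → Pre_get_outbriding_by_phenotype population → Spec_get_outbriding_by_phenotype population (get_outbriding_by_phenotype population)

-- ===== LEMMAS AND PROOFS =====

-- running maximum of g over a list of indices, seeded with s
def pvFMax (g : Nat → Int) (idxs : List Nat) (s : Int) : Int :=
  idxs.foldl (fun mx k => max mx (g k)) s

-- the unguarded strict-improvement step of A's inner loop
def pvStep (g : Nat → Int) (st : Int × Int) (k : Nat) : Int × Int :=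
  if g k > st.2 then ((k : Int), g k) else st

theorem pv_le_fmax (g : Nat → Int) : ∀ (idxs : List Nat) (s : Int), s ≤ pvFMax g idxs s := by
  intro idxs
  induction idxs with
  | nil => intro s; simp [pvFMax]
  | cons k tl ih =>
    intro s
    calc s ≤ max s (g k) := le_max_left _ _
    _ ≤ pvFMax g tl (max s (g k)) := ih _
    _ = pvFMax g (k :: tl) s := rfl

theorem pv_fmax_le (g : Nat → Int) : ∀ (idxs : List Nat) (s c : Int), s ≤ c →
    (∀ k ∈ idxs, g k ≤ c) → pvFMax g idxs s ≤ c := by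
  intro idxs
  induction idxs with
  | nil => intro s c hs _; simpa [pvFMax] using hs
  | cons k tl ih =>
    intro s c hs hb
    have : pvFMax g (k :: tl) s = pvFMax g tl (max s (g k)) := rfl
    rw [this]
    exact ih _ _ (max_le hs (hb k (by simp))) (fun k' hk' => hb k' (by simp [hk']))

theorem pv_mem_le_fmax (g : Nat → Int) : ∀ (idxs : List Nat) (s : Int) (k : Nat), k ∈ idxs →
    g k ≤ pvFMax g idxs s := by
  intro idxs
  induction idxs with
  | nil => intro s k hk; simp at hk
  | cons a tl ih =>
    intro s k hk
    rcases List.mem_cons.mp hk with h | h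
    · subst h
      calc g k ≤ max s (g k) := le_max_right _ _
      _ ≤ pvFMax g tl (max s (g k)) := pv_le_fmax g tl _
      _ = pvFMax g (k :: tl) s := rfl
    · exact ih _ _ h

-- A's inner scan finds the FIRST index attaining the running maximum (when it beats the seed)
theorem pv_scan (g : Nat → Int) : ∀ (idxs : List Nat) (st : Int × Int),
    idxs.foldl (pvStep g) st =
      if st.2 < pvFMax g idxs st.2
      then ((((idxs.find? (fun k => g k = pvFMax g idxs st.2)).getD 0 : Nat) : Int),
            pvFMax g idxs st.2)
      else st := by
  intro idxs
  induction idxs with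
  | nil => intro st; simp [pvFMax]
  | cons a tl ih =>
    intro st
    have hrw : pvFMax g (a :: tl) st.2 = pvFMax g tl (max st.2 (g a)) := rfl
    rw [List.foldl_cons, hrw]
    by_cases h1 : g a > st.2
    · have hstep : pvStep g st a = ((a : Int), g a) := by simp [pvStep, h1]
      rw [hstep]
      have hmax : max st.2 (g a) = g a := by omega
      rw [hmax]
      have hF : g a ≤ pvFMax g tl (g a) := pv_le_fmax g tl _
      have hcond : st.2 < pvFMax g tl (g a) := by omega
      rw [if_pos hcond]
      by_cases h2 : g a = pvFMax g tl (g a)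
      · have hfind : (a :: tl).find? (fun k => g k = pvFMax g tl (g a)) = some a :=
          List.find?_cons_of_pos (decide_eq_true h2)
        rw [hfind]
        have := ih ((a : Int), g a)
        simp only at this
        rw [this, if_neg (by omega)]
        simp only [Option.getD_some]
        exact congrArg (Prod.mk _) h2
      · have hlt : g a < pvFMax g tl (g a) := lt_of_le_of_ne hF h2
        have := ih ((a : Int), g a)
        simp only at this
        rw [this, if_pos hlt]
        have hfind : (a :: tl).find? (fun k => g k = pvFMax g tl (g a)) =
            tl.find? (fun k => g k = pvFMax g tl (g a)) :=
          List.find?_cons_of_neg (by simpa using h2)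
        rw [hfind]
    · have hstep : pvStep g st a = st := by simp [pvStep, h1]
      rw [hstep]
      have hmax : max st.2 (g a) = st.2 := by omega
      rw [hmax, ih st]
      by_cases h2 : st.2 < pvFMax g tl st.2
      · rw [if_pos h2, if_pos h2]
        have hne : ¬ (g a = pvFMax g tl st.2) := by omega
        have hfind : (a :: tl).find? (fun k => g k = pvFMax g tl st.2) =
            tl.find? (fun k => g k = pvFMax g tl st.2) :=
          List.find?_cons_of_neg (by simpa using hne)
        rw [hfind]
      · rw [if_neg h2, if_neg h2]

-- the `j != i` guard in A's inner loop is redundant: g i = 0 never beats a nonnegative best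
theorem pv_guard (g : Nat → Int) (i : Nat) (hi : g i = 0) :
    ∀ (idxs : List Nat) (st : Int × Int), 0 ≤ st.2 →
      idxs.foldl (fun st k => if k ≠ i ∧ g k > st.2 then ((k : Int), g k) else st) st =
      idxs.foldl (pvStep g) st := by
  intro idxs
  induction idxs with
  | nil => intro st _; rfl
  | cons a tl ih =>
    intro st hst
    rw [List.foldl_cons, List.foldl_cons]
    by_cases ha : a = i
    · subst ha
      have h1 : ¬ (a ≠ a ∧ g a > st.2) := by simp
      have h2 : pvStep g st a = st := by simp [pvStep]; omega
      rw [if_neg h1, h2]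
      exact ih st hst
    · by_cases h3 : g a > st.2
      · have h1 : (a ≠ i ∧ g a > st.2) := ⟨ha, h3⟩
        rw [if_pos h1]
        have h2 : pvStep g st a = ((a : Int), g a) := by simp [pvStep, h3]
        rw [h2]
        exact ih _ (by simp; omega)
      · have h1 : ¬ (a ≠ i ∧ g a > st.2) := by tauto
        have h2 : pvStep g st a = st := by simp [pvStep, h3]
        rw [if_neg h1, h2]
        exact ih st hst

-- first index whose value is v, through find? over the index range
theorem pv_find_val (f : List Int) (v : Int) (hv : v ∈ f) :
    (List.range f.length).find? (fun k => f.getD k 0 = v) =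
      some ((PySem.List.index? f v).getD 0) := by
  induction f with
  | nil => simp at hv
  | cons x tl ih =>
    rw [List.length_cons, List.range_succ_eq_map]
    by_cases hx : x = v
    · subst hx
      rw [List.find?_cons_of_pos (by simp), PySem.List.index?_cons_self]
      rfl
    · have hvtl : v ∈ tl := by
        rcases List.mem_cons.mp hv with h | h
        · exact absurd h.symm hx
        · exact h
      rw [List.find?_cons_of_neg (by simp [hx]), List.find?_map]
      rw [show ((fun k => decide ((x :: tl).getD k 0 = v)) ∘ Nat.succ) =
          (fun k => decide (tl.getD k 0 = v)) from by funext k; simp]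
      obtain ⟨j, hj⟩ := Option.isSome_iff_exists.mp
        ((PySem.List.index?_isSome_iff tl v).mpr hvtl)
      rw [ih hvtl, PySem.List.index?_cons_of_ne _ hx, hj]
      simp

-- first index whose value is v or w: the smaller of the two first occurrences
theorem pv_find_or (f : List Int) (v w : Int) (hv : v ∈ f) (hw : w ∈ f) :
    (List.range f.length).find? (fun k => f.getD k 0 = v ∨ f.getD k 0 = w) =
      some (min ((PySem.List.index? f v).getD 0) ((PySem.List.index? f w).getD 0)) := by
  induction f with
  | nil => simp at hv
  | cons x tl ih =>
    rw [List.length_cons, List.range_succ_eq_map]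
    by_cases hx : x = v ∨ x = w
    · rw [List.find?_cons_of_pos (by simpa using hx)]
      rcases hx with h | h
      · subst h; rw [PySem.List.index?_cons_self]; simp
      · subst h; rw [PySem.List.index?_cons_self]; simp
    · rw [not_or] at hx
      have hvtl : v ∈ tl := by
        rcases List.mem_cons.mp hv with h | h
        · exact absurd h.symm hx.1
        · exact h
      have hwtl : w ∈ tl := by
        rcases List.mem_cons.mp hw with h | h
        · exact absurd h.symm hx.2
        · exact h
      rw [List.find?_cons_of_neg (by simp [hx.1, hx.2]), List.find?_map]
      rw [show ((fun k => decide ((x :: tl).getD k 0 = v ∨ (x :: tl).getD k 0 = w)) ∘ Nat.succ) =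
          (fun k => decide (tl.getD k 0 = v ∨ tl.getD k 0 = w)) from by
        funext k; simp only [Function.comp_apply, List.getD_cons_succ]]
      obtain ⟨j, hj⟩ := Option.isSome_iff_exists.mp
        ((PySem.List.index?_isSome_iff tl v).mpr hvtl)
      obtain ⟨j', hj'⟩ := Option.isSome_iff_exists.mp
        ((PySem.List.index?_isSome_iff tl w).mpr hwtl)
      rw [ih hvtl hwtl, PySem.List.index?_cons_of_ne _ hx.1,
        PySem.List.index?_cons_of_ne _ hx.2, hj, hj']
      simp [Nat.succ_min_succ]

-- find? only depends on the predicate's values on the list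
theorem pv_find_congr {p q : Nat → Bool} : ∀ (l : List Nat), (∀ x ∈ l, p x = q x) →
    l.find? p = l.find? q := by
  intro l
  induction l with
  | nil => intro _; rfl
  | cons a tl ih =>
    intro h
    by_cases ha : p a = true
    · rw [List.find?_cons_of_pos ha, List.find?_cons_of_pos (by rw [← h a (by simp)]; exact ha)]
    · rw [List.find?_cons_of_neg ha, List.find?_cons_of_neg (by rw [← h a (by simp)]; exact ha),
        ih (fun x hx => h x (by simp [hx]))]

-- the largest |t - f[j]| over all j is attained at the min or the max of f
theorem pv_fmax_eq (f : List Int) (n : Nat) (hlen : f.length = n) (t m0 M0 : Int) (ht : t ∈ f)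
    (hm : PySem.List.min? f (fun x => x) = some m0)
    (hM : PySem.List.max? f (fun x => x) = some M0) :
    pvFMax (fun j => |t - f.getD j 0|) (List.range n) (|t - f.getD 0 0|) =
      max (t - m0) (M0 - t) := by
  have hne : f ≠ [] := by rintro rfl; simp at ht
  have hpos : 0 < f.length := List.length_pos_of_ne_nil hne
  have hmin := PySem.List.min?_isMin hm
  have hmax := PySem.List.max?_isMax hM
  have hmt : m0 ≤ t := hmin t ht
  have htM : t ≤ M0 := hmax t ht
  have hbound : ∀ k, k < f.length → |t - f.getD k 0| ≤ max (t - m0) (M0 - t) := by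
    intro k hk
    have hmem : f.getD k 0 ∈ f := by
      rw [List.getD_eq_getElem f 0 hk]; exact List.getElem_mem hk
    have h1 : m0 ≤ f.getD k 0 := hmin _ hmem
    have h2 : f.getD k 0 ≤ M0 := hmax _ hmem
    have h3 := le_max_left (t - m0) (M0 - t)
    have h4 := le_max_right (t - m0) (M0 - t)
    rcases abs_choice (t - f.getD k 0) with h | h <;> omega
  apply le_antisymm
  · exact pv_fmax_le _ _ _ _ (hbound 0 hpos)
      (fun k hk => hbound k (by rw [hlen]; exact List.mem_range.mp hk))
  · obtain ⟨km, hkm, hfkm⟩ := List.mem_iff_getElem.mp (PySem.List.min?_mem hm)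
    obtain ⟨kM, hkM, hfkM⟩ := List.mem_iff_getElem.mp (PySem.List.max?_mem hM)
    have e1 : |t - f.getD km 0| = t - m0 := by
      rw [List.getD_eq_getElem f 0 hkm, hfkm, abs_of_nonneg (by omega)]
    have e2 : |t - f.getD kM 0| = M0 - t := by
      rw [List.getD_eq_getElem f 0 hkM, hfkM, abs_of_nonpos (by omega)]; ring
    have g1 : t - m0 ≤ pvFMax (fun j => |t - f.getD j 0|) (List.range n) (|t - f.getD 0 0|) := by
      rw [← e1]
      exact pv_mem_le_fmax _ _ _ km (List.mem_range.mpr (by omega))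
    have g2 : M0 - t ≤ pvFMax (fun j => |t - f.getD j 0|) (List.range n) (|t - f.getD 0 0|) := by
      rw [← e2]
      exact pv_mem_le_fmax _ _ _ kM (List.mem_range.mpr (by omega))
    exact max_le g1 g2

-- first occurrence of the head value is index 0
theorem pv_index_head (f : List Int) (v : Int) (hne : f ≠ []) (h : f.getD 0 0 = v) :
    (PySem.List.index? f v).getD 0 = 0 := by
  obtain ⟨x, tl, rfl⟩ := List.exists_cons_of_ne_nil hne
  have hx : x = v := by simpa using h
  subst hx
  rw [PySem.List.index?_cons_self]
  rfl

-- A's inner loop selects exactly B's extreme-based partner index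
theorem pv_point (f : List Int) (n : Nat) (hlen : f.length = n) (k : Nat) (hk : k < n)
    (m0 M0 : Int)
    (hm : PySem.List.min? f (fun x => x) = some m0)
    (hM : PySem.List.max? f (fun x => x) = some M0) :
    ((List.range n).foldl
        (fun (st : Int × Int) j =>
          if j ≠ k ∧ |f.getD k 0 - f.getD j 0| > st.2
          then ((j : Int), |f.getD k 0 - f.getD j 0|) else st)
        ((0 : Int), |f.getD k 0 - f.getD 0 0|)).1 =
      ((if f.getD k 0 - m0 > M0 - f.getD k 0 then (PySem.List.index? f m0).getD 0
        else if M0 - f.getD k 0 > f.getD k 0 - m0 then (PySem.List.index? f M0).getD 0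
        else min ((PySem.List.index? f m0).getD 0) ((PySem.List.index? f M0).getD 0) : Nat) : Int) := by
  have hkf : k < f.length := by omega
  set t := f.getD k 0 with ht
  have htmem : t ∈ f := by
    rw [ht, List.getD_eq_getElem f 0 hkf]; exact List.getElem_mem hkf
  have hne : f ≠ [] := by rintro rfl; simp at htmem
  have hmin := PySem.List.min?_isMin hm
  have hmax := PySem.List.max?_isMax hM
  have hmt : m0 ≤ t := hmin t htmem
  have htM : t ≤ M0 := hmax t htmem
  have h1 : (List.range n).foldl
      (fun (st : Int × Int) j =>
        if j ≠ k ∧ |t - f.getD j 0| > st.2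
        then ((j : Int), |t - f.getD j 0|) else st)
      ((0 : Int), |t - f.getD 0 0|) =
      (List.range n).foldl (pvStep (fun j => |t - f.getD j 0|)) ((0 : Int), |t - f.getD 0 0|) :=
    pv_guard _ k (by show |t - f.getD k 0| = 0; rw [ht, sub_self, abs_zero]) _ _ (abs_nonneg _)
  rw [h1]
  have h2 := pv_scan (fun j => |t - f.getD j 0|) (List.range n) ((0 : Int), |t - f.getD 0 0|)
  simp only at h2
  rw [h2, pv_fmax_eq f n hlen t m0 M0 htmem hm hM]
  have h0f : (0 : Nat) < f.length := List.length_pos_of_ne_nil hne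
  have h0mem : f.getD 0 0 ∈ f := by
    rw [List.getD_eq_getElem f 0 h0f]; exact List.getElem_mem h0f
  have h0m : m0 ≤ f.getD 0 0 := hmin _ h0mem
  have h0M : f.getD 0 0 ≤ M0 := hmax _ h0mem
  have hseed : |t - f.getD 0 0| ≤ max (t - m0) (M0 - t) := by
    have h3 := le_max_left (t - m0) (M0 - t)
    have h4 := le_max_right (t - m0) (M0 - t)
    rcases abs_choice (t - f.getD 0 0) with h | h <;> omega
  by_cases c1 : t - m0 > M0 - t
  · have hD : max (t - m0) (M0 - t) = t - m0 := max_eq_left (by omega)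
    rw [hD, if_pos c1]
    have hpred : ∀ j ∈ List.range n, (decide (|t - f.getD j 0| = t - m0)) =
        (decide (f.getD j 0 = m0)) := by
      intro j hj
      have hjf : j < f.length := by rw [hlen]; exact List.mem_range.mp hj
      have hmem : f.getD j 0 ∈ f := by
        rw [List.getD_eq_getElem f 0 hjf]; exact List.getElem_mem hjf
      have hjm : m0 ≤ f.getD j 0 := hmin _ hmem
      have hjM : f.getD j 0 ≤ M0 := hmax _ hmem
      rw [decide_eq_decide]
      constructor
      · intro he; rcases abs_choice (t - f.getD j 0) with h | h <;> omega
      · intro he; rw [he, abs_of_nonneg (by omega)]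
    have hfind : (List.range n).find? (fun j => |t - f.getD j 0| = t - m0) =
        some ((PySem.List.index? f m0).getD 0) := by
      rw [pv_find_congr _ hpred, ← hlen, pv_find_val f m0 (PySem.List.min?_mem hm)]
    split_ifs with hc
    · rw [hfind]; simp
    · have hseedeq : |t - f.getD 0 0| = t - m0 := by rw [hD] at hseed; omega
      have hf0 : f.getD 0 0 = m0 := of_decide_eq_true
        (by rw [← hpred 0 (List.mem_range.mpr (by omega))]; exact decide_eq_true hseedeq)
      rw [pv_index_head f m0 hne hf0]
      simp
  · by_cases c2 : M0 - t > t - m0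
    · have hD : max (t - m0) (M0 - t) = M0 - t := max_eq_right (by omega)
      rw [hD, if_neg c1, if_pos c2]
      have hpred : ∀ j ∈ List.range n, (decide (|t - f.getD j 0| = M0 - t)) =
          (decide (f.getD j 0 = M0)) := by
        intro j hj
        have hjf : j < f.length := by rw [hlen]; exact List.mem_range.mp hj
        have hmem : f.getD j 0 ∈ f := by
          rw [List.getD_eq_getElem f 0 hjf]; exact List.getElem_mem hjf
        have hjm : m0 ≤ f.getD j 0 := hmin _ hmem
        have hjM : f.getD j 0 ≤ M0 := hmax _ hmem
        rw [decide_eq_decide]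
        constructor
        · intro he; rcases abs_choice (t - f.getD j 0) with h | h <;> omega
        · intro he; rw [he, abs_of_nonpos (by omega)]; ring
      have hfind : (List.range n).find? (fun j => |t - f.getD j 0| = M0 - t) =
          some ((PySem.List.index? f M0).getD 0) := by
        rw [pv_find_congr _ hpred, ← hlen, pv_find_val f M0 (PySem.List.max?_mem hM)]
      split_ifs with hc
      · rw [hfind]; simp
      · have hseedeq : |t - f.getD 0 0| = M0 - t := by rw [hD] at hseed; omega
        have hf0 : f.getD 0 0 = M0 := of_decide_eq_true
          (by rw [← hpred 0 (List.mem_range.mpr (by omega))]; exact decide_eq_true hseedeq)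
        rw [pv_index_head f M0 hne hf0]
        simp
    · -- tie: both extremes equally far; the scan stops at the earlier occurrence
      have hD : max (t - m0) (M0 - t) = t - m0 := max_eq_left (by omega)
      rw [hD, if_neg c1, if_neg c2]
      have hpred : ∀ j ∈ List.range n, (decide (|t - f.getD j 0| = t - m0)) =
          (decide (f.getD j 0 = m0 ∨ f.getD j 0 = M0)) := by
        intro j hj
        have hjf : j < f.length := by rw [hlen]; exact List.mem_range.mp hj
        have hmem : f.getD j 0 ∈ f := by
          rw [List.getD_eq_getElem f 0 hjf]; exact List.getElem_mem hjf
        have hjm : m0 ≤ f.getD j 0 := hmin _ hmem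
        have hjM : f.getD j 0 ≤ M0 := hmax _ hmem
        rw [decide_eq_decide]
        constructor
        · intro he
          rcases abs_choice (t - f.getD j 0) with h | h
          · left; omega
          · right; omega
        · rintro (he | he)
          · rw [he, abs_of_nonneg (by omega)]
          · rw [he, abs_of_nonpos (by omega)]; omega
      have hfind : (List.range n).find? (fun j => |t - f.getD j 0| = t - m0) =
          some (min ((PySem.List.index? f m0).getD 0) ((PySem.List.index? f M0).getD 0)) := by
        rw [pv_find_congr _ hpred, ← hlen,
          pv_find_or f m0 M0 (PySem.List.min?_mem hm) (PySem.List.max?_mem hM)]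
      split_ifs with hc
      · rw [hfind]; simp
      · have hseedeq : |t - f.getD 0 0| = t - m0 := by rw [hD] at hseed; omega
        have hf0 : f.getD 0 0 = m0 ∨ f.getD 0 0 = M0 := of_decide_eq_true
          (by rw [← hpred 0 (List.mem_range.mpr (by omega))]; exact decide_eq_true hseedeq)
        rcases hf0 with hx | hx
        · rw [pv_index_head f m0 hne hx, Nat.zero_min]
          simp
        · rw [pv_index_head f M0 hne hx, Nat.min_zero]
          simp

-- ===== VERDICT (by name: the statement is the Claim_ definition above) =====
theorem get_outbriding_by_phenotype_spec : Claim_equal_get_outbriding_by_phenotype := by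
  intro population _ _
  unfold Spec_get_outbriding_by_phenotype
  by_cases hpop : population = []
  · subst hpop; rfl
  · have hfv : (PySem.List.pyRange 0 (population.length : Int) 1).foldl
        (fun acc i => acc ++ [rosenbrock_function
          (PySem.List.pyGetD (PySem.List.pyGetD population i []) 0 0)
          (PySem.List.pyGetD (PySem.List.pyGetD population i []) 1 0)]) [] =
        population.map (fun p =>
          rosenbrock_function (PySem.List.pyGetD p 0 0) (PySem.List.pyGetD p 1 0)) := by
      rw [PySem.List.foldl_append_singleton_eq_map, List.nil_append]
      rw [show (fun i => rosenbrock_function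
            (PySem.List.pyGetD (PySem.List.pyGetD population i []) 0 0)
            (PySem.List.pyGetD (PySem.List.pyGetD population i []) 1 0)) =
          ((fun p => rosenbrock_function (PySem.List.pyGetD p 0 0) (PySem.List.pyGetD p 1 0)) ∘
            (fun i => PySem.List.pyGetD population i [])) from rfl]
      rw [← List.map_map, PySem.List.map_pyGetD_pyRange_zero']
    simp only [get_outbriding_by_phenotype, get_outbriding_by_phenotype_alt]
    rw [if_neg hpop]
    rw [hfv]
    set f := population.map (fun p =>
      rosenbrock_function (PySem.List.pyGetD p 0 0) (PySem.List.pyGetD p 1 0)) with hfdef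
    have hfne : f ≠ [] := by simp [hfdef, hpop]
    obtain ⟨m0, hm⟩ : ∃ m0, PySem.List.min? f (fun x => x) = some m0 := by
      cases h : PySem.List.min? f (fun x => x) with
      | none => exact absurd ((PySem.List.min?_eq_none_iff f _).mp h) hfne
      | some m0 => exact ⟨m0, rfl⟩
    obtain ⟨M0, hM⟩ : ∃ M0, PySem.List.max? f (fun x => x) = some M0 := by
      cases h : PySem.List.max? f (fun x => x) with
      | none => exact absurd ((PySem.List.max?_eq_none_iff f _).mp h) hfne
      | some M0 => exact ⟨M0, rfl⟩
    rw [hm, hM]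
    simp only [Option.getD_some]
    rw [PySem.List.foldl_append_singleton_eq_map, List.nil_append,
      PySem.List.pyRange_zero_nat, List.map_map]
    apply List.map_congr_left
    intro k hk
    have hkn : k < population.length := List.mem_range.mp hk
    simp only [Function.comp_apply, PySem.List.pyGetD_natCast, PySem.List.pyGetD_zero]
    rw [List.foldl_map]
    simp only [PySem.List.pyGetD_natCast, ne_eq, Nat.cast_inj]
    rw [pv_point f population.length (by simp [hfdef]) k hkn m0 M0 hm hM]
    simp only [PySem.List.pyGetD_natCast]
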